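-- pv_equiv track=rewrite | github.com/22310230A/IA_P2 | Lógica/Representar el Conocimiento/0027_Taxonomias_Categorias_Objetos.py | buscar_raiz
-- ===== SOURCE A (Python) =====
-- taxonomia = {
--     'Vehículo': ['Terrestre', 'Aéreo'],
--     'Terrestre': ['Camión', 'Auto', 'Motocicleta'],
--     'Aéreo': ['Avión', 'Helicóptero'],
--     'Ciudad': ['CDMX', 'Guadalajara', 'Querétaro']
-- }
--
-- objetos = {
--     'VolvoBus': 'Camión',
--     'Mazda3': 'Auto',
--     'Boeing737': 'Avión',
--     'Harley': 'Motocicleta',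
--     'CDMX': 'Ciudad'
-- }
--
-- def buscar_raiz(objeto):
--     categoria = objetos.get(objeto)
--     if not categoria:
--         return "No encontrado"
--     for padre, hijos in taxonomia.items():
--         if categoria in hijos:
--             return padre
--     return "Categoría raíz desconocida"
-- ===== SOURCE B (Python) =====
-- taxonomia = {
--     'Vehículo': ['Terrestre', 'Aéreo'],
--     'Terrestre': ['Camión', 'Auto', 'Motocicleta'],
--     'Aéreo': ['Avión', 'Helicóptero'],
--     'Ciudad': ['CDMX', 'Guadalajara', 'Querétaro']
-- }
--
-- objetos = {
--     'VolvoBus': 'Camión',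
--     'Mazda3': 'Auto',
--     'Boeing737': 'Avión',
--     'Harley': 'Motocicleta',
--     'CDMX': 'Ciudad'
-- }
--
-- def _desc(nodo, categoria):
--     # depth-first search below `nodo`; returns the parent of `categoria` if it
--     # occurs in this subtree, else None (correct because each category appears
--     # as a child of at most one parent in the taxonomy)
--     for hijo in taxonomia.get(nodo, []):
--         if hijo == categoria:
--             return nodo
--         res = _desc(hijo, categoria)
--         if res:
--             return res
--     return None
--
-- def buscar_raiz(objeto):
--     categoria = objetos.get(objeto)
--     if not categoria:
--         return "No encontrado"
--     for nodo in taxonomia: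
--         res = _desc(nodo, categoria)
--         if res:
--             return res
--     return "Categoría raíz desconocida"
-- ===== Notes on version B (the rewrite author's own statement) =====
-- stated objective: alternative
-- what changed: Replaces A's flat scan over taxonomia.items() with a recursive depth-first traversal of the taxonomy tree from each top-level key, returning the node under which the category is found as a direct child; correct because every category is a child of at most one parent.
import Mathlib
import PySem

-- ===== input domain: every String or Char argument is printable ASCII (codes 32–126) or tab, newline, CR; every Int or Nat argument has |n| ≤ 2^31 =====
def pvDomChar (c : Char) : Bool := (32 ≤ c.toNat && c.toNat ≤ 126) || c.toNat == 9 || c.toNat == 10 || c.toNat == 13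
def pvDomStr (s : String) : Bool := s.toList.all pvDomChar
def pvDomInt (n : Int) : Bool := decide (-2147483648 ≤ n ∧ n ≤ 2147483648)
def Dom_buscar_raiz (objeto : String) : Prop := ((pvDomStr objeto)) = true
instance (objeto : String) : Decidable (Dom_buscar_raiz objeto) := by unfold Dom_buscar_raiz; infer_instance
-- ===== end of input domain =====

-- B replaces A's flat scan over taxonomia with a recursive depth-first traversal of the taxonomy tree (alternative algorithm, same cost).

-- ===== PORT A =====
-- module-level data shared by both Pythons
def taxonomia_py : PySem.Dict String (List String) := PySem.Dict.mk
  [("Vehículo", ["Terrestre", "Aéreo"]),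
   ("Terrestre", ["Camión", "Auto", "Motocicleta"]),
   ("Aéreo", ["Avión", "Helicóptero"]),
   ("Ciudad", ["CDMX", "Guadalajara", "Querétaro"])]

def objetos_py : PySem.Dict String String := PySem.Dict.mk
  [("VolvoBus", "Camión"),
   ("Mazda3", "Auto"),
   ("Boeing737", "Avión"),
   ("Harley", "Motocicleta"),
   ("CDMX", "Ciudad")]

-- the 'for padre, hijos in taxonomia.items(): if categoria in hijos: return padre' loop
def loopA : List (String × List String) → String → String
  | [], _ => "Categoría raíz desconocida"
  | (padre, hijos) :: rest, c => if c ∈ hijos then padre else loopA rest c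

def buscar_raiz (objeto : String) : String :=
  match objetos_py.get? objeto with
  | none => "No encontrado"                 -- 'not categoria': None is falsy
  | some c => if c = "" then "No encontrado" else loopA taxonomia_py.items c

-- ===== PORT B =====
-- _desc(nodo, categoria): depth-first search below nodo; fuel bounds the
-- recursion depth (4 = number of taxonomy keys suffices; Python's recursion
-- terminates on this acyclic data, the fuel only makes the Lean port total).
def descLoopB (rec : String → Option String) (nodo c : String) : List String → Option String
  | [] => none
  | hijo :: rest =>
      if hijo = c then some nodo
      else match rec hijo with
        | some r => if r = "" then descLoopB rec nodo c rest else some r   -- 'if res:' truthiness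
        | none => descLoopB rec nodo c rest

def descB : Nat → String → String → Option String
  | 0, _, _ => none
  | f + 1, nodo, c => descLoopB (fun h => descB f h c) nodo c (taxonomia_py.getD nodo [])

-- 'for nodo in taxonomia: res = _desc(nodo, categoria); if res: return res'
def outerB (c : String) : List String → String
  | [] => "Categoría raíz desconocida"
  | nodo :: rest =>
      match descB 4 nodo c with
      | some r => if r = "" then outerB c rest else r   -- 'if res:' truthiness
      | none => outerB c rest

def buscar_raiz_alt (objeto : String) : String :=
  match objetos_py.get? objeto with
  | none => "No encontrado"
  | some c => if c = "" then "No encontrado" else outerB c taxonomia_py.keys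

-- ===== PRECONDITION & SPEC =====
def Spec_buscar_raiz (objeto : String) (out : String) : Prop := out = buscar_raiz_alt objeto
instance (objeto : String) (out : String) : Decidable (Spec_buscar_raiz objeto out) := by unfold Spec_buscar_raiz; infer_instance

-- ===== CLAIM =====
def Claim_equal_buscar_raiz : Prop := ∀ (objeto : String), Dom_buscar_raiz objeto → Spec_buscar_raiz objeto (buscar_raiz objeto)

-- ===== LEMMAS AND PROOFS =====

-- any category that objetos.get can return is one of its five literal values
theorem get?_objetos_mem (objeto c : String)
    (h : objetos_py.get? objeto = some c) :
    c ∈ ["Camión", "Auto", "Avión", "Motocicleta", "Ciudad"] := by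
  simp only [objetos_py, PySem.Dict.get?_mk_cons] at h
  split_ifs at h <;> simp_all [PySem.Dict.get?]

-- ===== VERDICT =====
theorem buscar_raiz_spec : Claim_equal_buscar_raiz := by
  intro objeto _
  unfold Spec_buscar_raiz buscar_raiz buscar_raiz_alt
  cases h : objetos_py.get? objeto with
  | none => rfl
  | some c =>
    have hc := get?_objetos_mem objeto c h
    fin_cases hc <;> decide
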